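-- pv_equiv track=rewrite | github.com/dimagi/commcare-cloud | src/commcare_cloud/ansible/plugins/inventory/csv.py | _parse_row_groups
-- ===== SOURCE A (Python) =====
-- def _parse_row_groups(csv_lines):
--     """Parse CSV lines into groups each with their own header column"""
--     row_groups = []
--     current_group = []
--     for line in csv_lines:
--         if line.startswith('#'):
--             continue
--         if not line.strip() or line.startswith(','):
--             if current_group:
--                 row_groups.append(current_group)
--                 current_group = []
--         else:
--             current_group.append(line)
--     if current_group:
--         row_groups.append(current_group)
--     return row_groups
-- ===== SOURCE B (Python) =====
-- from itertools import groupby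
--
--
-- def _is_sep(line):
--     return not line.strip() or line.startswith(',')
--
--
-- def _parse_row_groups(csv_lines):
--     """Parse CSV lines into groups each with their own header column"""
--     filtered = [line for line in csv_lines if not line.startswith('#')]
--     return [list(group) for key, group in groupby(filtered, key=_is_sep) if not key]
-- ===== Notes on version B (the rewrite author's own statement) =====
-- stated objective: idiomatic
-- what changed: Replaced the stateful accumulator-and-flush loop with a filter-then-groupby pipeline: drop '#' comment lines, group consecutive lines by the separator predicate with itertools.groupby, and keep the non-separator runs.
import Mathlib
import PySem

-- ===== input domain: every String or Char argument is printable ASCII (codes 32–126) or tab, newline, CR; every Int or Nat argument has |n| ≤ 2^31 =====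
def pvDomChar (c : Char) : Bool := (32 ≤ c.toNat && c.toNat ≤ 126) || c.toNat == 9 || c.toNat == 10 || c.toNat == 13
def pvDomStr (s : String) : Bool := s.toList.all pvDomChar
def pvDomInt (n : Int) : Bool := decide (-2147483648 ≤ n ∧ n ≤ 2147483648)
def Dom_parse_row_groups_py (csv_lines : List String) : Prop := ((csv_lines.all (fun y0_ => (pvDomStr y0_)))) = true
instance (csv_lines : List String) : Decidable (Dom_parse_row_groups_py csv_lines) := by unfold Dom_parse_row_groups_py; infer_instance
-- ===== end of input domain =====

-- B replaces A's stateful accumulator-and-flush loop by an idiomatic filter-then-groupby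
-- pipeline (drop '#' lines, group consecutive lines by the separator predicate, keep
-- non-separator runs); same cost, proved to return the same groups.

-- ===== PORT A =====
-- A's for-loop: state (row_groups, current_group), branches in A's order.
def pvParseLoop : List String → List (List String) → List String → List (List String)
  | [], rg, cur => if cur.isEmpty then rg else rg ++ [cur]
  | line :: rest, rg, cur =>
    if PySem.Str.startswith line "#" then pvParseLoop rest rg cur
    else if (PySem.Str.strip line == "") || PySem.Str.startswith line "," then
      if cur.isEmpty then pvParseLoop rest rg cur
      else pvParseLoop rest (rg ++ [cur]) []
    else pvParseLoop rest rg (cur ++ [line])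

def parse_row_groups_py (csv_lines : List String) : List (List String) :=
  pvParseLoop csv_lines [] []

-- ===== PORT B =====
-- Source B's helper _is_sep
def pvIsSep (line : String) : Bool :=
  (PySem.Str.strip line == "") || PySem.Str.startswith line ","

-- itertools.groupby(xs, key = pvIsSep): maximal runs of equal key, with their key.
def pvGroupby : List String → List (Bool × List String)
  | [] => []
  | l :: ls =>
    (pvIsSep l, l :: ls.takeWhile (fun x => pvIsSep x == pvIsSep l)) ::
      pvGroupby (ls.dropWhile (fun x => pvIsSep x == pvIsSep l))
termination_by xs => xs.length
decreasing_by
  have := List.length_dropWhile_le (fun x => pvIsSep x == pvIsSep l) ls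
  simp; omega

def parse_row_groups_py_alt (csv_lines : List String) : List (List String) :=
  let filtered := csv_lines.filter (fun line => !PySem.Str.startswith line "#")
  (pvGroupby filtered).filterMap (fun kg => if kg.1 then none else some kg.2)

-- ===== PRECONDITION & SPEC =====
def Spec_parse_row_groups_py (csv_lines : List String) (out : List (List String)) : Prop := out = parse_row_groups_py_alt csv_lines
instance (csv_lines : List String) (out : List (List String)) : Decidable (Spec_parse_row_groups_py csv_lines out) := by unfold Spec_parse_row_groups_py; infer_instance

-- ===== CLAIM (what is proved, stated in full; the proofs are below) =====
def Claim_equal_parse_row_groups_py : Prop := ∀ (csv_lines : List String), Dom_parse_row_groups_py csv_lines → Spec_parse_row_groups_py csv_lines (parse_row_groups_py csv_lines)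

-- ===== LEMMAS AND PROOFS =====

-- Abstract "rest of A's loop with pending group cur", with rg factored out.
def pvG : List String → List String → List (List String)
  | cur, [] => if cur.isEmpty then [] else [cur]
  | cur, l :: ls =>
    if PySem.Str.startswith l "#" then pvG cur ls
    else if pvIsSep l then (if cur.isEmpty then pvG cur ls else cur :: pvG [] ls)
    else pvG (cur ++ [l]) ls

theorem pvParseLoop_eq_G (ls : List String) : ∀ (rg : List (List String)) (cur : List String),
    pvParseLoop ls rg cur = rg ++ pvG cur ls := by
  induction ls with
  | nil => intro rg cur; simp only [pvParseLoop, pvG]; split <;> simp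
  | cons l ls ih =>
    intro rg cur
    simp only [pvParseLoop, pvG, pvIsSep]
    split
    · exact ih rg cur
    · split
      · split
        · exact ih rg cur
        · rw [ih (rg ++ [cur]) []]; simp
      · exact ih rg (cur ++ [l])

-- '#' lines may be filtered out before running pvG.
theorem pvG_filter (ls : List String) : ∀ (cur : List String),
    pvG cur ls = pvG cur (ls.filter (fun l => !PySem.Str.startswith l "#")) := by
  induction ls with
  | nil => intro cur; simp
  | cons l ls ih =>
    intro cur
    by_cases h : PySem.Str.startswith l "#" = true
    · rw [List.filter_cons_of_neg (by simpa using h)]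
      simp only [pvG, if_pos h]
      exact ih cur
    · rw [List.filter_cons_of_pos (by simpa using h)]
      simp only [pvG, if_neg h]
      split
      · split <;> simp [ih]
      · exact ih _

-- With a nonempty pending group and no '#' lines, pvG peels the leading non-separator run.
theorem pvG_run (ls : List String) : ∀ (cur : List String),
    (∀ l ∈ ls, ¬ PySem.Str.startswith l "#" = true) → cur ≠ [] →
    pvG cur ls = (cur ++ ls.takeWhile (fun x => pvIsSep x == false)) ::
      pvG [] (ls.dropWhile (fun x => pvIsSep x == false)) := by
  induction ls with
  | nil => intro cur _ hc; simp [pvG, hc]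
  | cons l ls ih =>
    intro cur hh hc
    have hl : ¬ PySem.Str.startswith l "#" = true := hh l (by simp)
    by_cases hs : pvIsSep l = true
    · rw [List.takeWhile_cons_of_neg (by simp [hs]),
        List.dropWhile_cons_of_neg (by simp [hs])]
      simp only [pvG, if_neg hl, if_pos hs,
        if_neg (by simpa using hc : ¬ cur.isEmpty = true)]
      simp
    · have hs' : pvIsSep l = false := by simpa using hs
      rw [List.takeWhile_cons_of_pos (by simp [hs']),
        List.dropWhile_cons_of_pos (by simp [hs'])]
      simp only [pvG, if_neg hl, if_neg hs]
      rw [ih (cur ++ [l]) (fun x hx => hh x (by simp [hx])) (by simp)]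
      simp

-- pvG with empty pending group skips a leading separator run.
theorem pvG_skip_sep (ls : List String) :
    pvG [] (ls.dropWhile (fun x => pvIsSep x == true)) = pvG [] ls := by
  induction ls with
  | nil => simp
  | cons l ls ih =>
    by_cases hs : pvIsSep l = true
    · rw [List.dropWhile_cons_of_pos (by simp [hs]), ih]
      by_cases hh : PySem.Str.startswith l "#" = true
      · simp only [pvG, if_pos hh]
      · simp only [pvG, if_neg hh, if_pos hs]
        simp
    · rw [List.dropWhile_cons_of_neg (by simp [hs])]

-- Main engine: on '#'-free lists, pvG with empty pending group is B's groupby pipeline.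
theorem pvG_eq_groupby : ∀ (n : Nat) (ls : List String), ls.length ≤ n →
    (∀ l ∈ ls, ¬ PySem.Str.startswith l "#" = true) →
    pvG [] ls = (pvGroupby ls).filterMap (fun kg => if kg.1 then none else some kg.2) := by
  intro n
  induction n with
  | zero => intro ls hn _; simp at hn; simp [hn, pvG, pvGroupby]
  | succ n ih =>
    intro ls hn hh
    match ls with
    | [] => simp [pvG, pvGroupby]
    | l :: ls =>
      have hl : ¬ PySem.Str.startswith l "#" = true := hh l (by simp)
      by_cases hs : pvIsSep l = true
      · have hrest : (ls.dropWhile (fun x => pvIsSep x == true)).length ≤ n := by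
          have := List.length_dropWhile_le (fun x => pvIsSep x == true) ls
          simp at hn; omega
        have hno : ∀ x ∈ ls.dropWhile (fun x => pvIsSep x == true),
            ¬ PySem.Str.startswith x "#" = true := fun x hx =>
          hh x (List.mem_cons_of_mem _ ((List.dropWhile_sublist _).subset hx))
        rw [pvGroupby]
        simp only [hs, List.filterMap_cons]
        rw [← ih _ hrest hno, pvG_skip_sep]
        simp only [pvG, if_neg hl, if_pos hs, List.isEmpty_nil]
        simp
      · have hs' : pvIsSep l = false := by simpa using hs
        have hrest : (ls.dropWhile (fun x => pvIsSep x == false)).length ≤ n := by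
          have := List.length_dropWhile_le (fun x => pvIsSep x == false) ls
          simp at hn; omega
        have hno : ∀ x ∈ ls.dropWhile (fun x => pvIsSep x == false),
            ¬ PySem.Str.startswith x "#" = true := fun x hx =>
          hh x (List.mem_cons_of_mem _ ((List.dropWhile_sublist _).subset hx))
        rw [pvGroupby]
        simp only [hs', List.filterMap_cons]
        rw [← ih _ hrest hno]
        have h0 : pvG [] (l :: ls) = pvG [l] ls := by
          simp only [pvG, if_neg hl, if_neg hs, List.nil_append]
        rw [h0, pvG_run ls [l] (fun x hx => hh x (by simp [hx])) (by simp)]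
        simp

-- ===== VERDICT (by name: the statement is the Claim_ definition above) =====
theorem parse_row_groups_py_spec : Claim_equal_parse_row_groups_py := by
  intro csv_lines _
  unfold Spec_parse_row_groups_py parse_row_groups_py parse_row_groups_py_alt
  rw [pvParseLoop_eq_G, pvG_filter]
  simp only [List.nil_append]
  exact pvG_eq_groupby _ _ le_rfl (by
    intro l hl
    have := List.of_mem_filter hl
    simpa using this)
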